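-- pv_equiv track=rewrite | github.com/chakraa1/Data-Structures-and-Algorithms | Arrays/Subarrays/AlternatingSubarraysEasy.py | AlternatingSubarraysOrderN
-- ===== SOURCE A (Python) =====
-- def AlternatingSubarraysOrderN(A,B):
--     ans = []
--
--     n = len(A)
--     k = 2 * B + 1
--     l,r = 0,0
--
--     while r < n:
--         if r == 0 or A[r] != A[r-1]: # Comparing with previous element but not with next element
--             r += 1
--         else:
--             l = r # When no alternating sub array sequence, then next sequence should start from current index
--             r += 1
--
--         subarray_length = r - l  # Because l,r are not both inclusive
--         if subarray_length == k:
--             ans.append(l+B) # as k is 2B +1 , middle element would be i+B the element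
--             l += 1 # Update left pointer to start next sequence
--
--     return ans
-- ===== SOURCE B (Python) =====
-- def AlternatingSubarraysOrderN(A, B):
--     k = 2 * B + 1
--     ans = []
--     if k >= 1:
--         n = len(A)
--         for i in range(n - k + 1):
--             if all(A[j] != A[j - 1] for j in range(i + 1, i + k)):
--                 ans.append(i + B)
--     return ans
-- ===== Notes on version B (the rewrite author's own statement) =====
-- stated objective: simpler
-- what changed: A's fused two-pointer sliding-window loop (left pointer reset on run breaks, emit on window length) is replaced by a direct brute-force test of every candidate window: for each start i check all(A[j] != A[j-1]) over the window and emit its center.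
import Mathlib
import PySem

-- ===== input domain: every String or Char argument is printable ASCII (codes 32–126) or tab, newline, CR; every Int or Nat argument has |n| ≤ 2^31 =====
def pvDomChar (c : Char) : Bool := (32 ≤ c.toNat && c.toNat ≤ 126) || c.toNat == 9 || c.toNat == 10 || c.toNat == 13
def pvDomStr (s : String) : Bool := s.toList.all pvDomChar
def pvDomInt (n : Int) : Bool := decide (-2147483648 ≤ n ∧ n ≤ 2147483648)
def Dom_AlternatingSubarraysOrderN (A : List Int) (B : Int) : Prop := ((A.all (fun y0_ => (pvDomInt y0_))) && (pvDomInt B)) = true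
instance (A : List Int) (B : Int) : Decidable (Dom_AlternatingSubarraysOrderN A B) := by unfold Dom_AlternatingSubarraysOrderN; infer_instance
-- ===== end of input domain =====

-- B replaces A's fused two-pointer sliding-window loop by a direct check of every length-(2B+1)
-- window (objective: simpler — shorter and plainer; it trades A's O(n) loop for an O(n·B) scan).

-- ===== PORT A =====
-- The while loop increments r by exactly 1 each pass and runs while r < n, so it is a fold over
-- r = 0,1,…,n-1 with state (l, ans).  A[r] / A[r-1] ported with pyGetD (exact here: r ∈ [0,n) is in
-- range, and A[r-1] only influences the branch when r ≠ 0, in which case r-1 ∈ [0,n) as well).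
def AlternatingSubarraysOrderN (A : List Int) (B : Int) : List Int :=
  let n : Int := A.length
  let k : Int := 2 * B + 1
  let st := (PySem.List.pyRange 0 n 1).foldl
    (fun (st : Int × List Int) (r : Int) =>
      let l : Int := if r = 0 ∨ PySem.List.pyGetD A r 0 ≠ PySem.List.pyGetD A (r-1) 0 then st.1 else r
      if (r + 1) - l = k then (l + 1, st.2 ++ [l + B]) else (l, st.2))
    (0, [])
  st.2

-- ===== PORT B =====
def AlternatingSubarraysOrderN_alt (A : List Int) (B : Int) : List Int :=
  let k : Int := 2 * B + 1
  if 1 ≤ k then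
    let n : Int := A.length
    (PySem.List.pyRange 0 (n - k + 1) 1).foldl
      (fun (ans : List Int) (i : Int) =>
        if (PySem.List.pyRange (i+1) (i+k) 1).all
             (fun j => decide (PySem.List.pyGetD A j 0 ≠ PySem.List.pyGetD A (j-1) 0))
        then ans ++ [i + B] else ans)
      []
  else []

-- ===== PRECONDITION & SPEC =====
def Spec_AlternatingSubarraysOrderN (A : List Int) (B : Int) (out : List Int) : Prop := out = AlternatingSubarraysOrderN_alt A B
instance (A : List Int) (B : Int) (out : List Int) : Decidable (Spec_AlternatingSubarraysOrderN A B out) := by unfold Spec_AlternatingSubarraysOrderN; infer_instance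

-- ===== CLAIM (what is proved, stated in full; the proofs are below) =====
def Claim_equal_AlternatingSubarraysOrderN : Prop := ∀ (A : List Int) (B : Int), Dom_AlternatingSubarraysOrderN A B → Spec_AlternatingSubarraysOrderN A B (AlternatingSubarraysOrderN A B)

-- ===== LEMMAS AND PROOFS =====

-- A[i] shorthand (indices used below are always in range, so the default is irrelevant)
def pvA (A : List Int) (i : Int) : Int := PySem.List.pyGetD A i 0

-- start index of the maximal alternating run of A ending at index r
def pvS (A : List Int) : Nat → Int
  | 0 => 0
  | r+1 => if pvA A ((r:Int)+1) ≠ pvA A (r:Int) then pvS A r else ((r:Int)+1)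

-- the body of A's while loop, named for the proofs (definitionally the lambda in the port)
def pvStepA (A : List Int) (B : Int) (st : Int × List Int) (r : Int) : Int × List Int :=
  let l : Int := if r = 0 ∨ PySem.List.pyGetD A r 0 ≠ PySem.List.pyGetD A (r-1) 0 then st.1 else r
  if (r + 1) - l = 2 * B + 1 then (l + 1, st.2 ++ [l + B]) else (l, st.2)

-- left pointer held by A's loop before iteration m (for B ≥ 0)
def pvL (A : List Int) (B : Int) : Nat → Int
  | 0 => 0
  | m+1 => max (pvS A m) ((m:Int) + 1 - 2*B)

-- element emitted (if any) by iteration r of A's loop (for B ≥ 0)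
def pvG (A : List Int) (B : Int) (r : Nat) : Option Int :=
  if pvS A r ≤ (r:Int) - 2*B then some ((r:Int) - B) else none

lemma pvS_nonneg (A : List Int) (r : Nat) : 0 ≤ pvS A r := by
  induction r with
  | zero => simp [pvS]
  | succ t ih => unfold pvS; split_ifs <;> omega

-- characterisation: the run ending at m starts at or before i  ⟺  every adjacent pair in (i, m] differs
lemma pvS_le_iff (A : List Int) (m : Nat) (i : Int) (h0 : 0 ≤ i) :
    pvS A m ≤ i ↔ ∀ j : Nat, i < (j:Int) → j ≤ m → pvA A j ≠ pvA A ((j:Int)-1) := by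
  induction m with
  | zero =>
    simp only [pvS]
    constructor
    · intro _ j hj1 hj2
      interval_cases j
      omega
    · intro _; exact h0
  | succ t ih =>
    unfold pvS
    split_ifs with hne
    · rw [ih]
      constructor
      · intro h j hj1 hj2
        rcases Nat.lt_or_ge j (t+1) with hj | hj
        · exact h j hj1 (by omega)
        · have hj' : j = t + 1 := by omega
          subst hj'
          have he : ((t:Int)+1) - 1 = (t:Int) := by ring
          simpa [he, Nat.cast_add, Nat.cast_one] using hne
      · intro h j hj1 hj2
        exact h j hj1 (by omega)
    · constructor
      · intro h j hj1 hj2; omega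
      · intro h
        by_contra hlt
        push Not at hlt
        have hx := h (t+1) (by push_cast; omega) (le_refl _)
        apply hx
        push_cast
        have he : ((t:Int)+1) - 1 = (t:Int) := by ring
        rw [he]
        by_contra hy
        exact hne hy
  -- end

lemma pvG_none (A : List Int) (B : Int) (r : Nat) (h : (r:Int) < 2*B) : pvG A B r = none := by
  unfold pvG
  have := pvS_nonneg A r
  split_ifs with hc
  · omega
  · rfl

-- the reset step of A's loop computes max(run start, r+1-k)
lemma stepL (A : List Int) (B : Int) (hB : 0 ≤ B) (m : Nat) :
    (if (m:Int) = 0 ∨ PySem.List.pyGetD A (m:Int) 0 ≠ PySem.List.pyGetD A ((m:Int)-1) 0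
     then pvL A B m else (m:Int)) = max (pvS A m) ((m:Int) - 2*B) := by
  cases m with
  | zero =>
    rw [if_pos (Or.inl (by norm_num))]
    simp [pvL, pvS]
    omega
  | succ t =>
    have hc1 : ((t+1:Nat):Int) = (t:Int)+1 := by push_cast; ring
    have hsub : ((t:Int)+1) - 1 = (t:Int) := by ring
    by_cases hd : pvA A ((t:Int)+1) ≠ pvA A (t:Int)
    · rw [if_pos (Or.inr (by rw [hc1, hsub]; exact hd))]
      have hS : pvS A (t+1) = pvS A t := by simp only [pvS]; rw [if_pos hd]
      simp only [pvL]
      rw [hS, hc1]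
    · have hnot : ¬(((t+1:Nat):Int) = 0 ∨
          PySem.List.pyGetD A ((t+1:Nat):Int) 0 ≠ PySem.List.pyGetD A (((t+1:Nat):Int)-1) 0) := by
        push Not
        refine ⟨by omega, ?_⟩
        rw [hc1, hsub]
        push Not at hd
        exact hd
      rw [if_neg hnot]
      have hS : pvS A (t+1) = (t:Int)+1 := by simp only [pvS]; rw [if_neg hd]
      rw [hc1, hS]
      rw [max_eq_left (by omega : (t:Int)+1-2*B ≤ (t:Int)+1)]
  -- end

-- invariant of A's loop, B ≥ 0: state after m iterations is (pvL m, emitted centers so far)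
lemma loopA (A : List Int) (B : Int) (hB : 0 ≤ B) (m : Nat) :
    ((List.range m).map (fun k : Nat => (k:Int))).foldl (pvStepA A B) (0, [])
    = (pvL A B m, (List.range m).filterMap (pvG A B)) := by
  induction m with
  | zero => simp [pvL]
  | succ m ih =>
    rw [List.range_succ, List.map_append, List.foldl_append, ih, List.filterMap_append]
    simp only [List.map_cons, List.map_nil, List.foldl_cons, List.foldl_nil]
    simp only [pvStepA]
    rw [stepL A B hB m]
    by_cases hc : pvS A m ≤ (m:Int) - 2*B
    · rw [if_pos (by rw [max_eq_right hc]; ring)]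
      have hg : (List.filterMap (pvG A B) [m]) = [(m:Int) - B] := by
        simp [pvG, hc]
      rw [hg]
      simp only [Prod.mk.injEq, pvL]
      constructor
      · rw [max_eq_right hc, max_eq_right (by omega : pvS A m ≤ (m:Int)+1-2*B)]
        ring
      · rw [max_eq_right hc]
        have he : (m:Int) - 2*B + B = (m:Int) - B := by ring
        rw [he]
    · have hge : (m:Int) - 2*B ≤ pvS A m := by omega
      rw [if_neg (by rw [max_eq_left hge]; omega)]
      have hg : (List.filterMap (pvG A B) [m]) = [] := by
        simp [pvG, hc]
      rw [hg]
      simp only [Prod.mk.injEq, List.append_nil, pvL]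
      refine ⟨?_, by simp⟩
      rw [max_eq_left hge, max_eq_left (by omega : (m:Int)+1-2*B ≤ pvS A m)]
  -- end

-- for B < 0 the window length 2B+1 is never reached: A's loop emits nothing
lemma loopA_neg (A : List Int) (B : Int) (hB : B < 0) (m : Nat) :
    (((List.range m).map (fun k : Nat => (k:Int))).foldl (pvStepA A B) (0, [])).2 = []
    ∧ (((List.range m).map (fun k : Nat => (k:Int))).foldl (pvStepA A B) (0, [])).1 ≤ (m:Int) := by
  induction m with
  | zero => simp
  | succ m ih =>
    obtain ⟨h2, h1⟩ := ih
    rw [List.range_succ, List.map_append, List.foldl_append]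
    simp only [List.map_cons, List.map_nil, List.foldl_cons, List.foldl_nil]
    simp only [pvStepA]
    split_ifs with hif hc hc
    · omega
    · exact ⟨h2, by push_cast; omega⟩
    · omega
    · exact ⟨h2, by push_cast; omega⟩
  -- end

-- B-side window test equals the run characterisation
lemma windowB (A : List Int) (B : Int) (hB : 0 ≤ B) (i : Nat) :
    ((PySem.List.pyRange ((i:Int)+1) ((i:Int)+(2*B+1)) 1).all
      (fun j => decide (PySem.List.pyGetD A j 0 ≠ PySem.List.pyGetD A (j-1) 0)) = true)
    ↔ pvS A (i + 2*B.toNat) ≤ (i:Int) := by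
  rw [List.all_eq_true, pvS_le_iff A _ _ (by omega)]
  constructor
  · intro h j hj1 hj2
    have hmem : ((j:Int)) ∈ PySem.List.pyRange ((i:Int)+1) ((i:Int)+(2*B+1)) 1 := by
      rw [PySem.List.mem_pyRange_one]
      omega
    simpa [pvA] using h _ hmem
  · intro h j hjmem
    rw [PySem.List.mem_pyRange_one] at hjmem
    have hj0 : 0 ≤ j := by omega
    have hx := h j.toNat (by omega) (by omega)
    simpa [pvA, Int.toNat_of_nonneg hj0] using hx
  -- end

lemma foldl_append_if' {α β : Type} (p : α → Bool) (f : α → β) (l : List α) :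
    ∀ acc : List β, l.foldl (fun acc x => if p x then acc ++ [f x] else acc) acc
      = acc ++ l.filterMap (fun x => if p x then some (f x) else none) := by
  induction l with
  | nil => simp
  | cons a t ih =>
    intro acc
    by_cases h : p a <;> simp [List.foldl_cons, h, ih]

-- ===== VERDICT (by name: the statement is the Claim_ definition above) =====
theorem AlternatingSubarraysOrderN_spec : Claim_equal_AlternatingSubarraysOrderN := by
  intro A B _
  unfold Spec_AlternatingSubarraysOrderN
  by_cases hB : 0 ≤ B
  · -- k = 2B+1 ≥ 1
    have hA : AlternatingSubarraysOrderN A B = (List.range A.length).filterMap (pvG A B) := by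
      show ((PySem.List.pyRange 0 ((A.length : Nat) : Int) 1).foldl (pvStepA A B) ((0:Int), ([]:List Int))).2 = _
      rw [PySem.List.pyRange_zero_natCast, loopA A B hB]
    have hAlt : AlternatingSubarraysOrderN_alt A B
        = (List.range (((A.length:Int) - 2*B).toNat)).filterMap (fun i => pvG A B (2*B.toNat + i)) := by
      unfold AlternatingSubarraysOrderN_alt
      rw [if_pos (by omega : (1:Int) ≤ 2*B+1)]
      show (List.foldl
        (fun (ans : List Int) (i : Int) =>
          if (PySem.List.pyRange (i+1) (i+(2*B+1)) 1).all
               (fun j => decide (PySem.List.pyGetD A j 0 ≠ PySem.List.pyGetD A (j-1) 0))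
          then ans ++ [i + B] else ans)
        [] (PySem.List.pyRange 0 ((A.length:Int) - (2*B+1) + 1) 1)) = _
      rw [PySem.List.pyRange_one 0 ((A.length:Int) - (2*B+1) + 1)]
      simp only [List.foldl_map]
      rw [foldl_append_if']
      rw [List.nil_append]
      have hM : ((A.length:Int) - (2*B+1) + 1 - 0).toNat = ((A.length:Int) - 2*B).toNat := by omega
      rw [hM]
      apply List.filterMap_congr
      intro i _
      simp only [zero_add]
      have hw := windowB A B hB i
      by_cases hc : pvS A (i + 2*B.toNat) ≤ (i:Int)
      · rw [if_pos (hw.mpr hc)]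
        unfold pvG
        rw [Nat.add_comm i (2*B.toNat)] at hc
        rw [if_pos (by omega)]
        congr 1
        omega
      · rw [if_neg (by rw [hw]; exact hc)]
        unfold pvG
        rw [Nat.add_comm i (2*B.toNat)] at hc
        rw [if_neg (by omega)]
    rw [hA, hAlt]
    by_cases hn : A.length ≤ 2*B.toNat
    · have hM0 : ((A.length:Int) - 2*B).toNat = 0 := by omega
      rw [hM0]
      simp only [List.range_zero, List.filterMap_nil]
      rw [List.filterMap_eq_nil_iff]
      intro r hr
      rw [List.mem_range] at hr
      exact pvG_none A B r (by omega)
    · have hsplit : A.length = 2*B.toNat + ((A.length:Int) - 2*B).toNat := by omega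
      conv_lhs => rw [hsplit]
      rw [List.range_add, List.filterMap_append, List.filterMap_map]
      have h1 : (List.range (2*B.toNat)).filterMap (pvG A B) = [] := by
        rw [List.filterMap_eq_nil_iff]
        intro r hr
        rw [List.mem_range] at hr
        exact pvG_none A B r (by omega)
      rw [h1, List.nil_append]
      rfl
  · -- k = 2B+1 ≤ -1 < any window length: both return []
    have hAlt : AlternatingSubarraysOrderN_alt A B = [] := by
      unfold AlternatingSubarraysOrderN_alt
      rw [if_neg (by omega)]
    rw [hAlt]
    show ((PySem.List.pyRange 0 ((A.length : Nat) : Int) 1).foldl (pvStepA A B) ((0:Int), ([]:List Int))).2 = _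
    rw [PySem.List.pyRange_zero_natCast]
    exact (loopA_neg A B (by omega) A.length).1
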